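-- pv_equiv track=rewrite | github.com/shartgers/book | skills/format-book-agent/scripts/build_print_pdf.py | _unicode_sans_bold_segment
-- ===== SOURCE A (Python) =====
-- def _unicode_sans_bold_segment(s: str) -> str:
--     """
--     Map ASCII A–Z, a–z, 0–9 to Mathematical Sans-Serif Bold so dc:description stays
--     plain-text (no HTML in OPF) while still appearing bold in readers and Calibre.
--     Other characters (punctuation, spaces) are left unchanged.
--     """
--     out: list[str] = []
--     for ch in s:
--         o = ord(ch)
--         if ord("A") <= o <= ord("Z"):
--             out.append(chr(0x1D5D4 + (o - ord("A"))))
--         elif ord("a") <= o <= ord("z"):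
--             out.append(chr(0x1D5EE + (o - ord("a"))))
--         elif ord("0") <= o <= ord("9"):
--             out.append(chr(0x1D7EC + (o - ord("0"))))
--         else:
--             out.append(ch)
--     return "".join(out)
-- ===== SOURCE B (Python) =====
-- # B: three staged range-shift passes (uppercase, then lowercase, then digits),
-- # composed whole-string transformations instead of one loop with an if/elif cascade.
-- # Correct because characters produced by an earlier stage are astral codepoints
-- # that fall outside every later ASCII range, so stages never interfere.
--
-- def _shift_range(s: str, lo: str, hi: str, base: int) -> str:
--     return "".join(chr(base + (ord(c) - ord(lo))) if lo <= c <= hi else c for c in s)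
--
-- def _unicode_sans_bold_segment(s: str) -> str:
--     s = _shift_range(s, "A", "Z", 0x1D5D4)
--     s = _shift_range(s, "a", "z", 0x1D5EE)
--     return _shift_range(s, "0", "9", 0x1D7EC)
-- ===== Notes on version B (the rewrite author's own statement) =====
-- stated objective: alternative
-- what changed: Replaces the single per-character loop with its if/elif/else cascade by a composition of three staged whole-string range-shift passes (uppercase, lowercase, digits); correct because earlier stages output astral codepoints outside every later ASCII range.
import Mathlib
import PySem

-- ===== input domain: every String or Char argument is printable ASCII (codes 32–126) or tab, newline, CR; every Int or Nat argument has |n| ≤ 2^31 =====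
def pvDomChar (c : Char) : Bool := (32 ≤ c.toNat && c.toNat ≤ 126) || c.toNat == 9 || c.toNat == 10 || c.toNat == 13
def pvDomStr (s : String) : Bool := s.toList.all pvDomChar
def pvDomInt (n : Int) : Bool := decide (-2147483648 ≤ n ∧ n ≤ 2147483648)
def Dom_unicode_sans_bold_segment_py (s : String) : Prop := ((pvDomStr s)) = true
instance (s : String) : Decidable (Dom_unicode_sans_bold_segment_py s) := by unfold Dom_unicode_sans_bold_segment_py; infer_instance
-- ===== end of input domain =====

-- B replaces the one-pass if/elif cascade by three composed whole-string range-shift passes; same values, alternative decomposition.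


-- ===== PORT A =====
-- loop appending one char per input char, branch cascade in A's order
def pvStepA (out : List Char) (ch : Char) : List Char :=
  let o := ch.toNat
  if 65 ≤ o ∧ o ≤ 90 then out ++ [Char.ofNat (0x1D5D4 + (o - 65))]
  else if 97 ≤ o ∧ o ≤ 122 then out ++ [Char.ofNat (0x1D5EE + (o - 97))]
  else if 48 ≤ o ∧ o ≤ 57 then out ++ [Char.ofNat (0x1D7EC + (o - 48))]
  else out ++ [ch]

def unicode_sans_bold_segment_py (s : String) : String :=
  String.mk (s.toList.foldl pvStepA [])

-- ===== PORT B =====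
-- _shift_range: one whole-string pass shifting chars of [lo,hi] to base+offset
def pvShiftRange (s : List Char) (lo hi : Char) (base : Nat) : List Char :=
  s.map (fun c => if lo ≤ c ∧ c ≤ hi then Char.ofNat (base + (c.toNat - lo.toNat)) else c)

-- three staged passes, composed
def unicode_sans_bold_segment_py_alt (s : String) : String :=
  String.mk (pvShiftRange (pvShiftRange (pvShiftRange s.toList 'A' 'Z' 0x1D5D4) 'a' 'z' 0x1D5EE) '0' '9' 0x1D7EC)

-- ===== PRECONDITION & SPEC =====
def Spec_unicode_sans_bold_segment_py (s : String) (out : String) : Prop := out = unicode_sans_bold_segment_py_alt s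
instance (s : String) (out : String) : Decidable (Spec_unicode_sans_bold_segment_py s out) := by unfold Spec_unicode_sans_bold_segment_py; infer_instance

-- ===== CLAIM (what is proved, stated in full; the proofs are below) =====
def Claim_equal_unicode_sans_bold_segment_py : Prop := ∀ (s : String), Dom_unicode_sans_bold_segment_py s → Spec_unicode_sans_bold_segment_py s (unicode_sans_bold_segment_py s)

-- ===== LEMMAS AND PROOFS =====

-- the three stages composed, as one per-char function
def pvStage3 (c : Char) : Char :=
  let f := fun (lo hi : Char) (base : Nat) (c : Char) =>
    if lo ≤ c ∧ c ≤ hi then Char.ofNat (base + (c.toNat - lo.toNat)) else c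
  f '0' '9' 0x1D7EC (f 'a' 'z' 0x1D5EE (f 'A' 'Z' 0x1D5D4 c))

lemma pvShift_as_map (l : List Char) :
    pvShiftRange (pvShiftRange (pvShiftRange l 'A' 'Z' 0x1D5D4) 'a' 'z' 0x1D5EE) '0' '9' 0x1D7EC
      = l.map pvStage3 := by
  simp [pvShiftRange, pvStage3]

lemma pvCharAgree : ∀ n, n < 127 →
    pvStepA [] (Char.ofNat n) = [pvStage3 (Char.ofNat n)] := by
  decide

lemma pvStepA_eq (c : Char) (h : pvDomChar c = true) :
    pvStepA [] c = [pvStage3 c] := by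
  have hn : c.toNat < 127 := by
    simp only [pvDomChar, Bool.or_eq_true, Bool.and_eq_true, decide_eq_true_eq,
      Nat.beq_eq_true_eq] at h
    omega
  have := pvCharAgree c.toNat hn
  rwa [Char.ofNat_toNat] at this

lemma pvStepA_acc (acc : List Char) (c : Char) :
    pvStepA acc c = acc ++ pvStepA [] c := by
  unfold pvStepA; dsimp only; split_ifs <;> simp

lemma pvFoldA (l : List Char) (h : l.all pvDomChar = true) :
    l.foldl pvStepA [] = l.map pvStage3 := by
  suffices H : ∀ acc, l.foldl pvStepA acc = acc ++ l.map pvStage3 by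
    simpa using H []
  induction l with
  | nil => simp
  | cons c t ih =>
    simp only [List.all_cons, Bool.and_eq_true] at h
    intro acc
    simp only [List.foldl_cons, List.map_cons]
    rw [pvStepA_acc, pvStepA_eq c h.1, ih h.2]
    simp

-- ===== VERDICT (by name: the statement is the Claim_ definition above) =====
theorem unicode_sans_bold_segment_py_spec : Claim_equal_unicode_sans_bold_segment_py := by
  intro s hdom
  unfold Spec_unicode_sans_bold_segment_py unicode_sans_bold_segment_py unicode_sans_bold_segment_py_alt
  rw [pvShift_as_map]
  congr 1
  exact pvFoldA _ hdom
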